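-- pv_equiv track=rewrite | github.com/xiandaiweijifen/research-direction-agent | backend/app/services/agent/orchestrator_service.py | _extract_overridden_plan_arguments
-- ===== SOURCE A (Python) =====
-- def _extract_overridden_plan_arguments(
--     clarification_context: dict[str, str],
-- ) -> list[str]:
--     overridden_arguments: set[str] = set()
--
--     if clarification_context.get("search_query_refinement", "").strip():
--         overridden_arguments.add("target")
--     if clarification_context.get("document_scope", "").strip() or clarification_context.get(
--         "filename", ""
--     ).strip():
--         overridden_arguments.add("filename")
--
--     for key in ("environment", "severity", "status", "ticket_id"):
--         if clarification_context.get(key, "").strip():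
--             overridden_arguments.add(key)
--
--     return sorted(overridden_arguments)
-- ===== SOURCE B (Python) =====
-- # Different traversal: instead of probing the dict with seven fixed lookups, scan
-- # the dict's own items once through a reverse key->argument mapping.
--
-- _KEY_TO_ARG = {
--     "search_query_refinement": "target",
--     "document_scope": "filename",
--     "filename": "filename",
--     "environment": "environment",
--     "severity": "severity",
--     "status": "status",
--     "ticket_id": "ticket_id",
-- }
--
--
-- def _extract_overridden_plan_arguments(
--     clarification_context: dict[str, str],
-- ) -> list[str]:
--     return sorted({
--         _KEY_TO_ARG[key]
--         for key, value in clarification_context.items()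
--         if key in _KEY_TO_ARG and value.strip()
--     })
-- ===== Notes on version B (the rewrite author's own statement) =====
-- stated objective: alternative
-- what changed: B inverts the data flow: instead of probing the dict with seven fixed get-and-strip checks (plus an explicit OR for filename), it scans the dict's own items once, translating each truthy entry through a reverse key->argument-name mapping into a set comprehension, then sorts.
import Mathlib
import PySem

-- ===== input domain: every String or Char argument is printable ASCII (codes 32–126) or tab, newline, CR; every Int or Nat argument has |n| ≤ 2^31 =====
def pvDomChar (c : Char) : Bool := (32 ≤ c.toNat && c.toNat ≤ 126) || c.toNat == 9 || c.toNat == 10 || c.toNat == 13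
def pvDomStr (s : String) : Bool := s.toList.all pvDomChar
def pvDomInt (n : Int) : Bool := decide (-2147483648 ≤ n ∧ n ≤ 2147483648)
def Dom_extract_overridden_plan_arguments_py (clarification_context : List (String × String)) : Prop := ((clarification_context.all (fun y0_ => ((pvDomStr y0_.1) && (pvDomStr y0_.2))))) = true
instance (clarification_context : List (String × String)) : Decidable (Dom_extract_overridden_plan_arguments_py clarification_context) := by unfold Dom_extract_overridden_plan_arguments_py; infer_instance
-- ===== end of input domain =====

-- B scans the dict's items once through a reverse key→argument mapping instead of
-- probing the dict with seven fixed lookups (objective: alternative data flow).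

-- ===== PORT A =====
-- clarification_context.get(k, "") on the assoc-list dict: first match, default ""
def pvCtxGet (ctx : List (String × String)) (k : String) : String :=
  match ctx.find? (fun p => p.1 == k) with
  | some p => p.2
  | none => ""

-- truthiness of s.strip(): non-empty after strip
def pvTruthy (s : String) : Bool := PySem.Str.strip s != ""

def extract_overridden_plan_arguments_py (clarification_context : List (String × String)) : List String :=
  let s0 : PySem.Set String := PySem.Set.empty
  let s1 := if pvTruthy (pvCtxGet clarification_context "search_query_refinement")
            then PySem.Set.add s0 "target" else s0
  let s2 := if pvTruthy (pvCtxGet clarification_context "document_scope")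
               || pvTruthy (pvCtxGet clarification_context "filename")
            then PySem.Set.add s1 "filename" else s1
  let s3 := ["environment", "severity", "status", "ticket_id"].foldl
    (fun acc key => if pvTruthy (pvCtxGet clarification_context key)
                    then PySem.Set.add acc key else acc) s2
  PySem.List.sorted s3 (fun x => x) false

-- ===== PORT B =====
-- the module-level table _KEY_TO_ARG (a dict of literals; only looked up, so a plain assoc list)
def pvKeyToArg : List (String × String) :=
  [("search_query_refinement", "target"),
   ("document_scope", "filename"),
   ("filename", "filename"),
   ("environment", "environment"),
   ("severity", "severity"),
   ("status", "status"),
   ("ticket_id", "ticket_id")]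

-- 'key in _KEY_TO_ARG' + '_KEY_TO_ARG[key]' combined: first-match lookup in the table
def pvLookup (k : String) : Option String :=
  (pvKeyToArg.find? (fun r => r.1 == k)).map Prod.snd

-- the set comprehension {_KEY_TO_ARG[k] for k, v in ctx.items() if k in _KEY_TO_ARG and v.strip()}, then sorted
def extract_overridden_plan_arguments_py_alt (clarification_context : List (String × String)) : List String :=
  PySem.List.sorted
    (PySem.Set.ofList
      (clarification_context.filterMap (fun p =>
        match pvLookup p.1 with
        | some name => if pvTruthy p.2 then some name else none
        | none => none)))
    (fun x => x) false

-- ===== PRECONDITION & SPEC =====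
-- Pre_ excludes association lists with duplicate keys: those do not represent a Python
-- dict (a dict's keys are unique), and A's first-match lookups vs B's full item scan
-- only disagree on such non-dict lists.
def Pre_extract_overridden_plan_arguments_py (clarification_context : List (String × String)) : Prop :=
  (clarification_context.map Prod.fst).Nodup
instance (clarification_context : List (String × String)) : Decidable (Pre_extract_overridden_plan_arguments_py clarification_context) := by unfold Pre_extract_overridden_plan_arguments_py; infer_instance
def pvWitness_extract_overridden_plan_arguments_py : (List (String × String)) :=
  [("environment", " prod "), ("filename", ""), ("status", "open")]

def Spec_extract_overridden_plan_arguments_py (clarification_context : List (String × String)) (out : List String) : Prop := out = extract_overridden_plan_arguments_py_alt clarification_context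
instance (clarification_context : List (String × String)) (out : List String) : Decidable (Spec_extract_overridden_plan_arguments_py clarification_context out) := by unfold Spec_extract_overridden_plan_arguments_py; infer_instance

-- ===== CLAIM (what is proved, stated in full; the proofs are below) =====
def Claim_equal_extract_overridden_plan_arguments_py : Prop := ∀ (clarification_context : List (String × String)), Dom_extract_overridden_plan_arguments_py clarification_context → Pre_extract_overridden_plan_arguments_py clarification_context → Spec_extract_overridden_plan_arguments_py clarification_context (extract_overridden_plan_arguments_py clarification_context)

-- ===== LEMMAS AND PROOFS =====

-- with nodup keys, two entries with the same key are the same entry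
theorem pv_eq_of_fst_eq {l : List (String × String)} (h : (l.map Prod.fst).Nodup)
    {p q : String × String} (hp : p ∈ l) (hq : q ∈ l) (he : p.1 = q.1) : p = q := by
  induction l with
  | nil => cases hp
  | cons a t ih =>
    simp only [List.map_cons, List.nodup_cons] at h
    rcases List.mem_cons.mp hp with rfl | hp' <;> rcases List.mem_cons.mp hq with rfl | hq'
    · rfl
    · exact absurd (he ▸ List.mem_map_of_mem hq') h.1
    · exact absurd (he ▸ List.mem_map_of_mem hp') h.1
    · exact ih h.2 hp' hq'

-- A's truthiness test of ctx.get(k, "") in terms of membership, under nodup keys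
theorem pv_truthy_get_iff {ctx : List (String × String)} (h : (ctx.map Prod.fst).Nodup)
    (k : String) :
    pvTruthy (pvCtxGet ctx k) = true ↔ ∃ v, (k, v) ∈ ctx ∧ pvTruthy v = true := by
  unfold pvCtxGet
  cases hf : ctx.find? (fun p => p.1 == k) with
  | none =>
    simp only [pvTruthy]
    constructor
    · intro hc; exact absurd hc (by decide)
    · rintro ⟨v, hv, htv⟩
      have := List.find?_eq_none.mp hf (k, v) hv
      simp at this
  | some p =>
    have hmem := List.mem_of_find?_eq_some hf
    have hk : p.1 = k := by
      have := List.find?_some hf; simpa using this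
    constructor
    · intro ht; exact ⟨p.2, by rw [← hk]; exact hmem, ht⟩
    · rintro ⟨v, hv, htv⟩
      have : p = (k, v) := pv_eq_of_fst_eq h hmem hv (by simpa using hk)
      rw [this]; exact htv

-- the table lookup, enumerated
theorem pv_lookup_iff (k x : String) :
    pvLookup k = some x ↔
      (k = "search_query_refinement" ∧ x = "target") ∨
      (k = "document_scope" ∧ x = "filename") ∨
      (k = "filename" ∧ x = "filename") ∨
      (k = "environment" ∧ x = "environment") ∨
      (k = "severity" ∧ x = "severity") ∨
      (k = "status" ∧ x = "status") ∨
      (k = "ticket_id" ∧ x = "ticket_id") := by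
  rcases eq_or_ne k "search_query_refinement" with rfl | h1
  · simp [pvLookup, pvKeyToArg, eq_comm]
  rcases eq_or_ne k "document_scope" with rfl | h2
  · simp [pvLookup, pvKeyToArg, List.find?, eq_comm]
  rcases eq_or_ne k "filename" with rfl | h3
  · simp [pvLookup, pvKeyToArg, List.find?, eq_comm]
  rcases eq_or_ne k "environment" with rfl | h4
  · simp [pvLookup, pvKeyToArg, List.find?, eq_comm]
  rcases eq_or_ne k "severity" with rfl | h5
  · simp [pvLookup, pvKeyToArg, List.find?, eq_comm]
  rcases eq_or_ne k "status" with rfl | h6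
  · simp [pvLookup, pvKeyToArg, List.find?, eq_comm]
  rcases eq_or_ne k "ticket_id" with rfl | h7
  · simp [pvLookup, pvKeyToArg, List.find?, eq_comm]
  · have b1 : ("search_query_refinement" == k) = false := beq_eq_false_iff_ne.mpr (Ne.symm h1)
    have b2 : ("document_scope" == k) = false := beq_eq_false_iff_ne.mpr (Ne.symm h2)
    have b3 : ("filename" == k) = false := beq_eq_false_iff_ne.mpr (Ne.symm h3)
    have b4 : ("environment" == k) = false := beq_eq_false_iff_ne.mpr (Ne.symm h4)
    have b5 : ("severity" == k) = false := beq_eq_false_iff_ne.mpr (Ne.symm h5)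
    have b6 : ("status" == k) = false := beq_eq_false_iff_ne.mpr (Ne.symm h6)
    have b7 : ("ticket_id" == k) = false := beq_eq_false_iff_ne.mpr (Ne.symm h7)
    simp [pvLookup, pvKeyToArg, List.find?, b1, b2, b3, b4, b5, b6, b7,
      h1, h2, h3, h4, h5, h6, h7]

-- membership in B's comprehension list
theorem pv_memB (ctx : List (String × String)) (x : String) :
    (x ∈ ctx.filterMap (fun p =>
        match pvLookup p.1 with
        | some name => if pvTruthy p.2 then some name else none
        | none => none)) ↔
      ∃ p ∈ ctx, pvLookup p.1 = some x ∧ pvTruthy p.2 = true := by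
  rw [List.mem_filterMap]
  constructor
  · rintro ⟨p, hp, hf⟩
    refine ⟨p, hp, ?_⟩
    cases hl : pvLookup p.1 with
    | none => rw [hl] at hf; cases hf
    | some name =>
      rw [hl] at hf
      by_cases ht : pvTruthy p.2 = true
      · simp [ht] at hf; exact ⟨by rw [hf], ht⟩
      · simp [ht] at hf
  · rintro ⟨p, hp, hl, ht⟩
    exact ⟨p, hp, by rw [hl, ht]; rfl⟩

-- a middle form of A's result: the names of the table rows whose key tests truthy
def pvMid (ctx : List (String × String)) : List String :=
  pvKeyToArg.filterMap (fun r => if pvTruthy (pvCtxGet ctx r.1) then some r.2 else none)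

-- A's branches, as a function of the seven truthiness bits, equal the middle form
theorem pv_core (t : String → Bool) :
    PySem.List.sorted
      ((["environment", "severity", "status", "ticket_id"].foldl
        (fun acc key => if t key then PySem.Set.add acc key else acc)
        (if t "document_scope" || t "filename"
         then PySem.Set.add (if t "search_query_refinement" then PySem.Set.add PySem.Set.empty "target" else PySem.Set.empty) "filename"
         else (if t "search_query_refinement" then PySem.Set.add PySem.Set.empty "target" else PySem.Set.empty))) : PySem.Set String)
      (fun x => x) false
    = PySem.List.sorted
        (PySem.Set.ofList (pvKeyToArg.filterMap (fun r => if t r.1 then some r.2 else none)))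
        (fun x => x) false := by
  cases h1 : t "search_query_refinement" <;> cases h2 : t "document_scope" <;>
  cases h3 : t "filename" <;> cases h4 : t "environment" <;> cases h5 : t "severity" <;>
  cases h6 : t "status" <;> cases h7 : t "ticket_id" <;>
    simp [pvKeyToArg, h1, h2, h3, h4, h5, h6, h7, List.foldl, List.filterMap,
      PySem.Set.add, PySem.Set.ofList, PySem.Set.empty, PySem.Set.contains,
      PySem.List.sorted, PySem.List.insertBy]

theorem pv_A_mid (ctx : List (String × String)) :
    extract_overridden_plan_arguments_py ctx
      = PySem.List.sorted (PySem.Set.ofList (pvMid ctx)) (fun x => x) false :=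
  pv_core (fun k => pvTruthy (pvCtxGet ctx k))

-- ===== VERDICT (by name: the statement is the Claim_ definition above) =====
theorem extract_overridden_plan_arguments_py_spec : Claim_equal_extract_overridden_plan_arguments_py := by
  intro ctx _ hpre
  unfold Spec_extract_overridden_plan_arguments_py extract_overridden_plan_arguments_py_alt
  rw [pv_A_mid, PySem.List.sorted_id_eq_sorted_id_iff_perm]
  apply (List.perm_ext_iff_of_nodup (PySem.Set.nodup_ofList _) (PySem.Set.nodup_ofList _)).mpr
  intro x
  rw [PySem.Set.mem_ofList, PySem.Set.mem_ofList, pv_memB ctx x]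
  unfold pvMid
  rw [List.mem_filterMap]
  simp only [pvKeyToArg, List.mem_cons, List.not_mem_nil, or_false, exists_eq_or_imp,
    exists_eq_left, Option.ite_none_right_eq_some, Option.some_inj]
  constructor
  · intro h
    rcases h with ⟨ht, rfl⟩ | ⟨ht, rfl⟩ | ⟨ht, rfl⟩ | ⟨ht, rfl⟩ | ⟨ht, rfl⟩ | ⟨ht, rfl⟩ | ⟨ht, rfl⟩
    · obtain ⟨v, hv, htv⟩ := (pv_truthy_get_iff hpre _).mp ht
      exact ⟨("search_query_refinement", v), hv, by rw [pv_lookup_iff]; simp, htv⟩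
    · obtain ⟨v, hv, htv⟩ := (pv_truthy_get_iff hpre _).mp ht
      exact ⟨("document_scope", v), hv, by rw [pv_lookup_iff]; simp, htv⟩
    · obtain ⟨v, hv, htv⟩ := (pv_truthy_get_iff hpre _).mp ht
      exact ⟨("filename", v), hv, by rw [pv_lookup_iff]; simp, htv⟩
    · obtain ⟨v, hv, htv⟩ := (pv_truthy_get_iff hpre _).mp ht
      exact ⟨("environment", v), hv, by rw [pv_lookup_iff]; simp, htv⟩
    · obtain ⟨v, hv, htv⟩ := (pv_truthy_get_iff hpre _).mp ht
      exact ⟨("severity", v), hv, by rw [pv_lookup_iff]; simp, htv⟩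
    · obtain ⟨v, hv, htv⟩ := (pv_truthy_get_iff hpre _).mp ht
      exact ⟨("status", v), hv, by rw [pv_lookup_iff]; simp, htv⟩
    · obtain ⟨v, hv, htv⟩ := (pv_truthy_get_iff hpre _).mp ht
      exact ⟨("ticket_id", v), hv, by rw [pv_lookup_iff]; simp, htv⟩
  · rintro ⟨⟨k, v⟩, hp, hl, ht⟩
    rw [pv_lookup_iff] at hl
    rcases hl with ⟨rfl, rfl⟩ | ⟨rfl, rfl⟩ | ⟨rfl, rfl⟩ | ⟨rfl, rfl⟩ | ⟨rfl, rfl⟩ | ⟨rfl, rfl⟩ | ⟨rfl, rfl⟩ <;>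
      · have hT := (pv_truthy_get_iff hpre _).mpr ⟨v, hp, ht⟩
        simp [hT]
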